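-- pv_equiv track=rewrite | github.com/Logonz/729G17-ngram-classifier | gengram.py | ngram_freqs
-- ===== SOURCE A (Python) =====
-- SEP = " " # token separator symbol
--
-- def ngram_freqs(ngrams):
--     """ Builds dict of TOKEN_SEQUENCEs and NEXT_TOKEN frequencies """
--
--     ### has form TOKEN_SEQUENCE : DICT OF { NEXT_TOKEN : COUNT }
--     ###      e.g        "a b c" : {"d" : 4, "e" : 2, "f" : 6 }
--     counts = {}
--
--     # Using example of ngram "a b c e" ...
--     for ngram in ngrams:
--         token_seq  = SEP.join(ngram[:-1])   # "a b c"
--         last_token = ngram[-1]              # "e"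
--
--         # create empty {NEXT_TOKEN : COUNT} dict if token_seq not seen before
--         if token_seq not in counts:
--             counts[token_seq] = {};
--
--         # initialize count for newly seen next_tokens
--         if last_token not in counts[token_seq]:
--             counts[token_seq][last_token] = 0;
--
--         counts[token_seq][last_token] += 1;
--
--     return counts;
-- ===== SOURCE B (Python) =====
-- SEP = " "
--
-- def ngram_freqs(ngrams):
--     """ Builds dict of TOKEN_SEQUENCEs and NEXT_TOKEN frequencies """
--     # group-then-count: pair each ngram with its key once, then for each distinct
--     # key (first-occurrence order) count the last tokens of its group
--     keyed = [(SEP.join(ng[:-1]), ng[-1]) for ng in ngrams]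
--     counts = {}
--     for seq in dict.fromkeys(s for s, _ in keyed):
--         lasts = [l for s, l in keyed if s == seq]
--         counts[seq] = {l: lasts.count(l) for l in dict.fromkeys(lasts)}
--     return counts
-- ===== Notes on version B (the rewrite author's own statement) =====
-- stated objective: alternative
-- what changed: B replaces A's incremental point-by-point nested-dict insertion with a group-then-count decomposition: it pairs each ngram with its key once, iterates over the distinct keys (dict.fromkeys order), and builds each inner dict in one go by counting last tokens of that key's group.
import Mathlib
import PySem

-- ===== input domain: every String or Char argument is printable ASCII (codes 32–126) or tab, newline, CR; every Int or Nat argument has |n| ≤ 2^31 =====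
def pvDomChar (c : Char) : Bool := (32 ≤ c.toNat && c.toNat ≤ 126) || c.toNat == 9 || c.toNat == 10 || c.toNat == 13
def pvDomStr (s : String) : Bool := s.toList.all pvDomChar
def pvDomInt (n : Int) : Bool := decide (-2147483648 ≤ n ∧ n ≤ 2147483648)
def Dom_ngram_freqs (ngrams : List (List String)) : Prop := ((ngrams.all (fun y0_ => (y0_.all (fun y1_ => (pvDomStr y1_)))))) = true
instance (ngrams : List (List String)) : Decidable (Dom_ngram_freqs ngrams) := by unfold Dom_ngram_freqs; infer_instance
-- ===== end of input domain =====

-- B replaces A's incremental nested-dict insertion with a group-then-count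
-- decomposition (distinct keys first, then count each group's last tokens);
-- same return value, alternative structure (B is quadratic).


-- ===== PORT A =====
-- literal port of A's loop: counts is a dict of dicts, updated in place per ngram
def ngram_freqs (ngrams : List (List String)) : List (String × List (String × Int)) :=
  let counts := ngrams.foldl (fun counts ngram =>
    let token_seq := PySem.Str.join " " (PySem.List.slice ngram none (some (-1)))
    let last_token := (PySem.List.pyGet? ngram (-1)).getD ""   -- total form; Pre_ rules out the none case
    let counts := if counts.contains token_seq then counts
                  else counts.insert token_seq PySem.Dict.empty
    let inner := counts.getD token_seq PySem.Dict.empty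
    let inner := if inner.contains last_token then inner
                 else inner.insert last_token 0
    let inner := inner.insert last_token (inner.getD last_token 0 + 1)
    counts.insert token_seq inner) PySem.Dict.empty
  counts.items.map (fun p => (p.1, p.2.items))

-- ===== PORT B =====
-- literal port of Source B: keyed pairs, distinct keys in first-occurrence order,
-- inner dict per key as {l : lasts.count(l) for l in dict.fromkeys(lasts)}
def ngram_freqs_alt (ngrams : List (List String)) : List (String × List (String × Int)) :=
  let keyed := ngrams.map (fun ng =>
    (PySem.Str.join " " (PySem.List.slice ng none (some (-1))),
     (PySem.List.pyGet? ng (-1)).getD ""))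
  (PySem.List.dedup (keyed.map (fun p => p.1))).map (fun seq =>
    let lasts := (keyed.filter (fun p => p.1 == seq)).map (fun p => p.2)
    (seq, (PySem.List.dedup lasts).map (fun l => (l, (lasts.count l : Int)))))

-- ===== PRECONDITION & SPEC =====
-- Pre_ excludes exactly the inputs containing an empty ngram, on which A's
-- 'ngram[-1]' raises IndexError (B raises there too).
def Pre_ngram_freqs (ngrams : List (List String)) : Prop := ∀ ng ∈ ngrams, ng ≠ []
instance (ngrams : List (List String)) : Decidable (Pre_ngram_freqs ngrams) := by unfold Pre_ngram_freqs; infer_instance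
def pvWitness_ngram_freqs : List (List String) := [["a", "b", "c"], ["a", "b", "d"], ["a", "b", "c"], ["x"]]

def Spec_ngram_freqs (ngrams : List (List String)) (out : List (String × List (String × Int))) : Prop := out = ngram_freqs_alt ngrams
instance (ngrams : List (List String)) (out : List (String × List (String × Int))) : Decidable (Spec_ngram_freqs ngrams out) := by unfold Spec_ngram_freqs; infer_instance

-- ===== CLAIM (what is proved, stated in full; the proofs are below) =====
def Claim_equal_ngram_freqs : Prop := ∀ (ngrams : List (List String)), Dom_ngram_freqs ngrams → Pre_ngram_freqs ngrams → Spec_ngram_freqs ngrams (ngram_freqs ngrams)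

-- ===== LEMMAS AND PROOFS =====

-- the key and last-token of one ngram, shared by both step characterisations
def pvKey (ng : List String) : String := PySem.Str.join " " (PySem.List.slice ng none (some (-1)))
def pvLast (ng : List String) : String := (PySem.List.pyGet? ng (-1)).getD ""

-- A's loop body, simplified to a single insert of an updated inner dict
def pvStep (d : PySem.Dict String (PySem.Dict String Int)) (ng : List String) :
    PySem.Dict String (PySem.Dict String Int) :=
  d.insert (pvKey ng)
    ((d.getD (pvKey ng) PySem.Dict.empty).insert (pvLast ng)
      ((d.getD (pvKey ng) PySem.Dict.empty).getD (pvLast ng) 0 + 1))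

-- A's literal body equals pvStep (the two membership tests collapse)
lemma pvStep_eq (d : PySem.Dict String (PySem.Dict String Int)) (ng : List String) :
    (let token_seq := PySem.Str.join " " (PySem.List.slice ng none (some (-1)))
     let last_token := (PySem.List.pyGet? ng (-1)).getD ""
     let counts := if d.contains token_seq then d
                   else d.insert token_seq PySem.Dict.empty
     let inner := counts.getD token_seq PySem.Dict.empty
     let inner := if inner.contains last_token then inner
                  else inner.insert last_token 0
     let inner := inner.insert last_token (inner.getD last_token 0 + 1)
     counts.insert token_seq inner) = pvStep d ng := by
  simp only [pvStep, pvKey, pvLast]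
  set k := PySem.Str.join " " (PySem.List.slice ng none (some (-1)))
  set t := (PySem.List.pyGet? ng (-1)).getD ""
  by_cases hk : d.contains k
  · simp only [hk, if_pos]
    by_cases ht : (d.getD k PySem.Dict.empty).contains t
    · simp [ht]
    · have htf : (d.getD k PySem.Dict.empty).contains t = false := by simpa using ht
      have h0 : (d.getD k PySem.Dict.empty).getD t 0 = 0 :=
        PySem.Dict.getD_of_not_contains _ _ htf
      simp [htf, h0, PySem.Dict.getD_insert_self, PySem.Dict.insert_insert_self]
  · have hkf : d.contains k = false := by simpa using hk
    have h0 : d.getD k PySem.Dict.empty = PySem.Dict.empty :=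
      PySem.Dict.getD_of_not_contains _ _ hkf
    simp [hkf, h0, PySem.Dict.getD_insert_self, PySem.Dict.insert_insert_self,
      PySem.Dict.getD_empty]

-- the inner dict at key s after A's loop: the counter step folded over the
-- last tokens of the ngrams whose key is s
lemma pvGetD_foldl (l : List (List String)) (d : PySem.Dict String (PySem.Dict String Int)) (s : String) :
    (l.foldl pvStep d).getD s PySem.Dict.empty =
      ((l.filter (fun ng => pvKey ng == s)).map pvLast).foldl
        (fun inner t => inner.insert t (inner.getD t 0 + 1))
        (d.getD s PySem.Dict.empty) := by
  induction l generalizing d with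
  | nil => rfl
  | cons ng l ih =>
    by_cases h : pvKey ng = s
    · subst h
      simp only [List.foldl_cons, List.filter_cons, BEq.rfl, if_pos, List.map_cons]
      rw [ih]
      simp [pvStep, PySem.Dict.getD_insert_self]
    · have hb : (pvKey ng == s) = false := by simp [h]
      simp only [List.foldl_cons, List.filter_cons, hb, Bool.false_eq_true, if_neg,
        not_false_iff]
      rw [ih]
      simp only [pvStep]
      rw [PySem.Dict.getD_insert_of_ne _ _ _ (Ne.symm h)]

-- the keys of A's final dict: distinct ngram keys in first-occurrence order
lemma pvKeys_foldl (ngrams : List (List String)) :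
    (ngrams.foldl pvStep PySem.Dict.empty).keys = PySem.Set.ofList (ngrams.map pvKey) := by
  unfold pvStep
  rw [PySem.Dict.keys_foldl_insert_key ngrams pvKey
    (fun d ng => (d.getD (pvKey ng) PySem.Dict.empty).insert (pvLast ng)
      ((d.getD (pvKey ng) PySem.Dict.empty).getD (pvLast ng) 0 + 1)) PySem.Dict.empty]
  rfl

lemma pvNodup_foldl (ngrams : List (List String)) :
    (ngrams.foldl pvStep PySem.Dict.empty).keys.Nodup := by
  unfold pvStep
  exact PySem.Dict.nodup_keys_foldl_insert_key ngrams pvKey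
    (fun d ng => (d.getD (pvKey ng) PySem.Dict.empty).insert (pvLast ng)
      ((d.getD (pvKey ng) PySem.Dict.empty).getD (pvLast ng) 0 + 1)) PySem.Dict.empty
    PySem.Dict.nodup_keys_empty

theorem ngram_freqs_spec : Claim_equal_ngram_freqs := by
  intro ngrams _ _
  unfold Spec_ngram_freqs ngram_freqs ngram_freqs_alt
  have hfun : (fun (counts : PySem.Dict String (PySem.Dict String Int)) (ngram : List String) =>
      let token_seq := PySem.Str.join " " (PySem.List.slice ngram none (some (-1)))
      let last_token := (PySem.List.pyGet? ngram (-1)).getD ""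
      let counts := if counts.contains token_seq then counts
                    else counts.insert token_seq PySem.Dict.empty
      let inner := counts.getD token_seq PySem.Dict.empty
      let inner := if inner.contains last_token then inner
                   else inner.insert last_token 0
      let inner := inner.insert last_token (inner.getD last_token 0 + 1)
      counts.insert token_seq inner) = pvStep :=
    funext fun d => funext fun ng => pvStep_eq d ng
  simp only [hfun]
  rw [PySem.Dict.items_eq_map_keys _ (pvNodup_foldl ngrams) PySem.Dict.empty,
    pvKeys_foldl ngrams]
  rw [List.map_map]
  have houter : PySem.List.dedup ((ngrams.map (fun ng =>
      (PySem.Str.join " " (PySem.List.slice ng none (some (-1))),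
       (PySem.List.pyGet? ng (-1)).getD ""))).map (fun p => p.1))
      = PySem.Set.ofList (ngrams.map pvKey) := by
    rw [PySem.List.dedup_eq_ofList, List.map_map]
    rfl
  rw [houter]
  apply List.map_congr_left
  intro s _
  simp only [Function.comp]
  have hinner := pvGetD_foldl ngrams PySem.Dict.empty s
  rw [PySem.Dict.getD_empty] at hinner
  rw [hinner, PySem.Dict.foldl_insert_getD_add_one_eq_counter, PySem.Dict.items_counter]
  have hl : ((ngrams.map (fun ng =>
      (PySem.Str.join " " (PySem.List.slice ng none (some (-1))),
       (PySem.List.pyGet? ng (-1)).getD ""))).filter (fun p => p.1 == s)).map (fun p => p.2)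
      = (ngrams.filter (fun ng => pvKey ng == s)).map pvLast := by
    rw [List.filter_map, List.map_map]
    rfl
  rw [hl, PySem.List.dedup_eq_ofList]

-- ===== VERDICT (by name: the statement is the Claim_ definition above) =====
-- (the verdict theorem ngram_freqs_spec is stated and proved directly above)
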